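-- pv_equiv track=rewrite | github.com/JiazeWang/Luna16 | preprocess/utility.py | _get_point_after_2d_rotation
-- ===== SOURCE A (Python) =====
-- def _get_point_after_2d_rotation(in_point: tuple, shape: tuple, rot90s: int, flip: bool = False):
--     assert len(in_point) == 2 and len(shape) == 2
--     rot90s = rot90s % 4
--     result_point = list(in_point)
--     for i in range(rot90s):
--         previous = result_point.copy()
--         axes = [0, 1]
--         point_complement = (shape[0] - 1 - previous[0], shape[1] - 1 - previous[1])
--         result_point[axes[0]] = point_complement[axes[1]]
--         result_point[axes[1]] = previous[axes[0]]
--     if flip: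
--         result_point[0] = shape[0] - 1 - result_point[0]
--     return result_point
-- ===== SOURCE B (Python) =====
-- def _get_point_after_2d_rotation(in_point: tuple, shape: tuple, rot90s: int, flip: bool = False):
--     assert len(in_point) == 2 and len(shape) == 2
--     r = rot90s % 4
--     x, y = in_point
--     W = shape[1]
--     if r == 0:
--         result = [x, y]
--     elif r == 1:
--         result = [W - 1 - y, x]
--     elif r == 2:
--         result = [W - 1 - x, W - 1 - y]
--     else:
--         result = [y, W - 1 - x]
--     if flip:
--         result[0] = shape[0] - 1 - result[0]
--     return result
-- ===== Notes on version B (the rewrite author's own statement) =====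
-- stated objective: simpler
-- what changed: Replaced the per-quarter-turn mutation loop by a direct closed-form case selection on rot90s % 4 (the loop's composition for r=0..3), then the same flip adjustment.
import Mathlib
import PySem

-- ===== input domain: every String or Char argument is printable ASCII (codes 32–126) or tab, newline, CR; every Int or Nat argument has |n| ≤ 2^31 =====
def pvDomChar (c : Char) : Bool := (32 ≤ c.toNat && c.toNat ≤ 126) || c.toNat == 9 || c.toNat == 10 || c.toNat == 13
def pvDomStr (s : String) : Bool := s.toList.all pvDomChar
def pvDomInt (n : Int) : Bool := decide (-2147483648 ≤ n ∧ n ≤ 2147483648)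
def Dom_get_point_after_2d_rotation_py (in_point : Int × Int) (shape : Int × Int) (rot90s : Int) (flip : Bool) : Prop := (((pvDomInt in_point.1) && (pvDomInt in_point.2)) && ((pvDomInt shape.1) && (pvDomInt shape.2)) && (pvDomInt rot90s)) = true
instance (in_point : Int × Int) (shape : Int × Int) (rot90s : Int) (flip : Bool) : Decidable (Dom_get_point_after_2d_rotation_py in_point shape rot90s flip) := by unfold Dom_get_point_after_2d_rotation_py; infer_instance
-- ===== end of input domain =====

-- ===== PORT A =====
-- B replaces A's quarter-turn mutation loop by a closed-form case on rot90s % 4 (simpler; return value only).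
def get_point_after_2d_rotation_py (in_point : Int × Int) (shape : Int × Int) (rot90s : Int) (flip : Bool) : List Int :=
  let r := PySem.Int.mod rot90s 4
  let result_point : List Int := [in_point.1, in_point.2]
  let result_point := (PySem.List.pyRange 0 r 1).foldl (fun rp _ =>
      let previous := rp
      let point_complement := (shape.1 - 1 - previous.getD 0 0, shape.2 - 1 - previous.getD 1 0)
      let rp := rp.set 0 point_complement.2
      let rp := rp.set 1 (previous.getD 0 0)
      rp) result_point
  if flip then result_point.set 0 (shape.1 - 1 - result_point.getD 0 0) else result_point

-- ===== PORT B =====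
def get_point_after_2d_rotation_py_alt (in_point : Int × Int) (shape : Int × Int) (rot90s : Int) (flip : Bool) : List Int :=
  let r := PySem.Int.mod rot90s 4
  let x := in_point.1
  let y := in_point.2
  let w := shape.2
  let result : List Int :=
    if r = 0 then [x, y]
    else if r = 1 then [w - 1 - y, x]
    else if r = 2 then [w - 1 - x, w - 1 - y]
    else [y, w - 1 - x]
  if flip then result.set 0 (shape.1 - 1 - result.getD 0 0) else result

-- ===== PRECONDITION & SPEC =====
def Spec_get_point_after_2d_rotation_py (in_point : Int × Int) (shape : Int × Int) (rot90s : Int) (flip : Bool) (out : List Int) : Prop := out = get_point_after_2d_rotation_py_alt in_point shape rot90s flip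
instance (in_point : Int × Int) (shape : Int × Int) (rot90s : Int) (flip : Bool) (out : List Int) : Decidable (Spec_get_point_after_2d_rotation_py in_point shape rot90s flip out) := by unfold Spec_get_point_after_2d_rotation_py; infer_instance

-- ===== CLAIM (what is proved, stated in full; the proofs are below) =====
def Claim_equal_get_point_after_2d_rotation_py : Prop := ∀ (in_point : Int × Int) (shape : Int × Int) (rot90s : Int) (flip : Bool), Dom_get_point_after_2d_rotation_py in_point shape rot90s flip → Spec_get_point_after_2d_rotation_py in_point shape rot90s flip (get_point_after_2d_rotation_py in_point shape rot90s flip)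

-- ===== LEMMAS AND PROOFS =====
lemma pyRange_unfold1 : PySem.List.pyRange 0 1 1 = [0] := by
  rw [PySem.List.pyRange_one_cons (by norm_num), PySem.List.pyRange_one_eq_nil (by norm_num)]
lemma pyRange_unfold2 : PySem.List.pyRange 0 2 1 = [0, 1] := by
  rw [PySem.List.pyRange_one_cons (by norm_num), PySem.List.pyRange_one_cons (by norm_num),
    PySem.List.pyRange_one_eq_nil (by norm_num)]; norm_num
lemma pyRange_unfold3 : PySem.List.pyRange 0 3 1 = [0, 1, 2] := by
  rw [PySem.List.pyRange_one_cons (by norm_num), PySem.List.pyRange_one_cons (by norm_num),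
    PySem.List.pyRange_one_cons (by norm_num), PySem.List.pyRange_one_eq_nil (by norm_num)]
  norm_num

-- ===== VERDICT (by name: the statement is the Claim_ definition above) =====
theorem get_point_after_2d_rotation_py_spec : Claim_equal_get_point_after_2d_rotation_py := by
  intro in_point shape rot90s flip _
  unfold Spec_get_point_after_2d_rotation_py
  unfold get_point_after_2d_rotation_py get_point_after_2d_rotation_py_alt
  have h0 : (0:Int) < 4 := by norm_num
  have hge := PySem.Int.mod_nonneg rot90s h0
  have hlt := PySem.Int.mod_lt rot90s h0
  have hcases : PySem.Int.mod rot90s 4 = 0 ∨ PySem.Int.mod rot90s 4 = 1 ∨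
      PySem.Int.mod rot90s 4 = 2 ∨ PySem.Int.mod rot90s 4 = 3 := by omega
  rcases hcases with h | h | h | h <;>
    rw [h] <;>
    simp [pyRange_unfold1, pyRange_unfold2, pyRange_unfold3,
      List.foldl, List.set, List.getD]
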